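-- pv_equiv track=rewrite | github.com/M1ndmech/python_ext | homework/hw3/hw3.py | repeatables
-- ===== SOURCE A (Python) =====
-- def repeatables (list1):
--     uniques = list(set(list1))
--     repetitions_dict = {}
--     for unique in uniques:
--         count = 0
--         for item in list1:
--             if unique == item:
--                 count += 1
--         repetitions_dict.update({unique : count})
--     repetitions = list(k for k, v in repetitions_dict.items() if v !=1)
--     return repetitions
-- ===== SOURCE B (Python) =====
-- def repeatables(list1):
--     # One pass: detect duplicates by membership in `seen`, no counting.
--     seen = set()
--     dup = set()
--     for x in list1:
--         if x in seen:
--             dup.add(x)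
--         else:
--             seen.add(x)
--     return [x for x in set(list1) if x in dup]
-- ===== Notes on version B (the rewrite author's own statement) =====
-- stated objective: simpler
-- what changed: Replaces A's per-unique nested counting loop and dict of counts with a single pass maintaining seen/dup sets (membership-based duplicate detection), then filters set(list1) by membership in dup.
import Mathlib
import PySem

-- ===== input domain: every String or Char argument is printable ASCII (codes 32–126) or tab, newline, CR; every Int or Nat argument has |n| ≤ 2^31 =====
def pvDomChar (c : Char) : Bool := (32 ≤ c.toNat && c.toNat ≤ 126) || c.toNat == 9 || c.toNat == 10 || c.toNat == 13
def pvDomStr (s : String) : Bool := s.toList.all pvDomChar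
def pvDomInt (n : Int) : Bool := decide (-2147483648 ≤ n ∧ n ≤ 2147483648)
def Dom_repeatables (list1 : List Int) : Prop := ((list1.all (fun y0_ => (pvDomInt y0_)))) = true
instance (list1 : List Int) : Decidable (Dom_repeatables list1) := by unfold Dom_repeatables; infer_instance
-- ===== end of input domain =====

-- B replaces A's per-unique counting loop + dict of counts with a single seen/dup-set pass (simpler).


-- ===== PORT A =====
def repeatables (list1 : List Int) : List Int :=
  let uniques : List Int := PySem.Set.ofList list1
  let repetitions_dict : PySem.Dict Int Int :=
    uniques.foldl (fun d unique =>
      d.insert unique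
        (list1.foldl (fun count item => if unique == item then count + 1 else count) (0 : Int)))
      PySem.Dict.empty
  (repetitions_dict.items.filter (fun kv => kv.2 ≠ 1)).map (·.1)

-- ===== PORT B =====
def repeatables_alt (list1 : List Int) : List Int :=
  let sd : PySem.Set Int × PySem.Set Int :=
    list1.foldl (fun sd x =>
      if PySem.Set.contains sd.1 x then (sd.1, PySem.Set.add sd.2 x)
      else (PySem.Set.add sd.1 x, sd.2))
      (PySem.Set.empty, PySem.Set.empty)
  (PySem.Set.ofList list1).filter (fun x => PySem.Set.contains sd.2 x)

-- ===== PRECONDITION & SPEC =====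
def Spec_repeatables (list1 : List Int) (out : List Int) : Prop := out = repeatables_alt list1
instance (list1 : List Int) (out : List Int) : Decidable (Spec_repeatables list1 out) := by unfold Spec_repeatables; infer_instance

-- ===== CLAIM (what is proved, stated in full; the proofs are below) =====
def Claim_equal_repeatables : Prop := ∀ (list1 : List Int), Dom_repeatables list1 → Spec_repeatables list1 (repeatables list1)

-- ===== LEMMAS AND PROOFS =====

-- A's inner counting loop computes the count.
lemma count_loop (list1 : List Int) (u : Int) (c : Int) :
    list1.foldl (fun count item => if u == item then count + 1 else count) c
      = c + (list1.count u : Int) := by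
  induction list1 generalizing c with
  | nil => simp
  | cons x t ih =>
    simp only [List.foldl]
    rw [ih, List.count_cons]
    by_cases h : u = x
    · simp only [h, beq_self_eq_true, if_true]
      push_cast
      ring
    · have h' : ¬ x = u := fun hh => h hh.symm
      simp [h, h']

-- A's dict-building loop over fresh distinct keys appends (key, value) pairs in order.
lemma items_fold (f : Int → Int) (uniq : List Int) (d : PySem.Dict Int Int)
    (hn : uniq.Nodup) (hfresh : ∀ a ∈ uniq, d.contains a = false) :
    (uniq.foldl (fun d u => d.insert u (f u)) d).items
      = d.items ++ uniq.map (fun u => (u, f u)) := by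
  induction uniq generalizing d with
  | nil => simp
  | cons x t ih =>
    have hfresh' : ∀ a ∈ t, (d.insert x (f x)).contains a = false := by
      intro a ha
      rw [PySem.Dict.contains_insert]
      have hax : a ≠ x := fun h => (List.nodup_cons.mp hn).1 (h ▸ ha)
      simp [hax, hfresh a (List.mem_cons_of_mem x ha)]
    have hfx : d.contains x = false := hfresh x (by simp)
    simp only [List.foldl, List.map_cons]
    rw [ih _ (List.Nodup.of_cons hn) hfresh', PySem.Dict.items_insert]
    simp [hfx]

-- B's pass: membership in the dup set is "appears at least twice" (relative to seen s / dup d).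
lemma dup_mem (l : List Int) (s d : PySem.Set Int) (y : Int) :
    (y ∈ (l.foldl (fun sd x =>
        if PySem.Set.contains sd.1 x then (sd.1, PySem.Set.add sd.2 x)
        else (PySem.Set.add sd.1 x, sd.2)) (s, d)).2)
      ↔ (y ∈ d ∨ (y ∈ s ∧ y ∈ l) ∨ 2 ≤ l.count y) := by
  induction l generalizing s d with
  | nil => simp
  | cons x t ih =>
    have hyt : y ∈ t ↔ 1 ≤ t.count y := List.count_pos_iff.symm
    by_cases hx : PySem.Set.contains s x = true
    · have hxs : x ∈ s := (PySem.Set.contains_iff s x).mp hx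
      simp only [List.foldl, hx, if_true, ih, PySem.Set.mem_add]
      by_cases h : y = x
      · subst h
        simp [hxs]
      · simp [h, Ne.symm h]
        try tauto
    · have hxs : x ∉ s := fun hm => hx ((PySem.Set.contains_iff s x).mpr hm)
      simp only [List.foldl, hx, if_false, Bool.false_eq_true, ih, PySem.Set.mem_add]
      by_cases h : y = x
      · subst h
        have hcc : (y :: t).count y = t.count y + 1 := List.count_cons_self
        constructor
        · rintro (hd1 | ⟨_, ht⟩ | hc)
          · exact Or.inl hd1
          · have h1 : 1 ≤ t.count y := List.count_pos_iff.mpr ht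
            exact Or.inr (Or.inr (by omega))
          · exact Or.inr (Or.inr (by omega))
        · rintro (hd1 | ⟨hs1, _⟩ | hc)
          · exact Or.inl hd1
          · exact absurd hs1 hxs
          · have h1 : 1 ≤ t.count y := by omega
            exact Or.inr (Or.inl ⟨Or.inr rfl, List.count_pos_iff.mp h1⟩)
      · simp [h, Ne.symm h]
        try tauto

-- The dup set of B's pass from the empty state holds exactly the elements counted at least 2.
lemma contains_dup (list1 : List Int) (u : Int) :
    PySem.Set.contains
      ((list1.foldl (fun sd x =>
        if PySem.Set.contains sd.1 x then (sd.1, PySem.Set.add sd.2 x)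
        else (PySem.Set.add sd.1 x, sd.2))
        ((PySem.Set.empty : PySem.Set Int), (PySem.Set.empty : PySem.Set Int))).2) u
      = decide (2 ≤ list1.count u) := by
  have hd := dup_mem list1 PySem.Set.empty PySem.Set.empty u
  have hempty : (u ∈ (PySem.Set.empty : PySem.Set Int)) = False := by
    simp [PySem.Set.empty]
  rw [hempty] at hd
  by_cases h2 : 2 ≤ list1.count u
  · rw [(PySem.Set.contains_iff _ _).mpr (hd.mpr (Or.inr (Or.inr h2)))]
    simp [h2]
  · have hnm : ¬ u ∈ (list1.foldl (fun sd x =>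
        if PySem.Set.contains sd.1 x then (sd.1, PySem.Set.add sd.2 x)
        else (PySem.Set.add sd.1 x, sd.2))
        ((PySem.Set.empty : PySem.Set Int), (PySem.Set.empty : PySem.Set Int))).2 := by
      intro hm
      rcases hd.mp hm with h | ⟨h, _⟩ | h
      · exact h
      · exact h
      · exact h2 h
    rw [Bool.eq_false_iff.mpr (fun hc => hnm ((PySem.Set.contains_iff _ _).mp hc))]
    simp [h2]

-- ===== VERDICT (by name: the statement is the Claim_ definition above) =====
theorem repeatables_spec : Claim_equal_repeatables := by
  intro list1 _
  show repeatables list1 = repeatables_alt list1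
  unfold repeatables repeatables_alt
  simp only [contains_dup]
  rw [items_fold _ _ _ (PySem.Set.nodup_ofList (xs := list1))
      (fun a _ => PySem.Dict.contains_empty a)]
  rw [show (PySem.Dict.empty : PySem.Dict Int Int).items = [] from rfl, List.nil_append]
  simp only [count_loop, zero_add]
  rw [List.filter_map, List.map_map]
  have h1 : ((fun kv : Int × Int => kv.1) ∘ fun u : Int => (u, (list1.count u : Int)))
      = fun u : Int => u := rfl
  have h2c : ((fun kv : Int × Int => decide (kv.2 ≠ 1)) ∘ fun u : Int => (u, (list1.count u : Int)))
      = fun u : Int => decide ((list1.count u : Int) ≠ 1) := rfl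
  rw [h1, h2c, List.map_id']
  apply List.filter_congr
  intro u hu
  have humem : u ∈ list1 := (PySem.Set.mem_ofList _ _).mp hu
  have hpos : 1 ≤ list1.count u := List.count_pos_iff.mpr humem
  by_cases h2 : 2 ≤ list1.count u
  · have hne : ((list1.count u : Int) ≠ 1) := by
      have : (2 : Int) ≤ (list1.count u : Int) := by exact_mod_cast h2
      omega
    simp [hne, h2]
  · have heq1 : list1.count u = 1 := by omega
    simp [heq1]
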